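-- pv_equiv track=rewrite | github.com/rkdwlgus585-glitch/main | desktop_related/g2b_v3/collect.py | classify_api_failures
-- ===== SOURCE A (Python) =====
-- def classify_api_failures(failures):
--     if not failures:
--         return "unknown"
--     if all("HTTP404" in f for f in failures):
--         return "missing-required-params-or-invalid-endpoint"
--     if any("HTTP401" in f or "HTTP403" in f for f in failures):
--         return "auth-or-permission"
--     if any("HTTP500" in f or "HTTP502" in f or "HTTP503" in f for f in failures):
--         return "upstream-server-error"
--     if any("invalid-response" in f for f in failures):
--         return "invalid-response-format"
--     if any("URLError" in f or "TimeoutError" in f for f in failures):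
--         return "network-error"
--     return "unknown"
-- ===== SOURCE B (Python) =====
-- def classify_api_failures(failures):
--     if not failures:
--         return "unknown"
--     all_404 = True
--     any_auth = False
--     any_upstream = False
--     any_invalid = False
--     any_network = False
--     for f in failures:
--         if "HTTP404" not in f:
--             all_404 = False
--         if "HTTP401" in f or "HTTP403" in f:
--             any_auth = True
--         if "HTTP500" in f or "HTTP502" in f or "HTTP503" in f:
--             any_upstream = True
--         if "invalid-response" in f:
--             any_invalid = True
--         if "URLError" in f or "TimeoutError" in f:
--             any_network = True
--     if all_404:
--         return "missing-required-params-or-invalid-endpoint"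
--     if any_auth:
--         return "auth-or-permission"
--     if any_upstream:
--         return "upstream-server-error"
--     if any_invalid:
--         return "invalid-response-format"
--     if any_network:
--         return "network-error"
--     return "unknown"
-- ===== Notes on version B (the rewrite author's own statement) =====
-- stated objective: simpler
-- what changed: Replaces five separate short-circuit scans of the failure list with a single pass that accumulates five boolean flags, followed by a flat precedence ladder over the flags.
import Mathlib
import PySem

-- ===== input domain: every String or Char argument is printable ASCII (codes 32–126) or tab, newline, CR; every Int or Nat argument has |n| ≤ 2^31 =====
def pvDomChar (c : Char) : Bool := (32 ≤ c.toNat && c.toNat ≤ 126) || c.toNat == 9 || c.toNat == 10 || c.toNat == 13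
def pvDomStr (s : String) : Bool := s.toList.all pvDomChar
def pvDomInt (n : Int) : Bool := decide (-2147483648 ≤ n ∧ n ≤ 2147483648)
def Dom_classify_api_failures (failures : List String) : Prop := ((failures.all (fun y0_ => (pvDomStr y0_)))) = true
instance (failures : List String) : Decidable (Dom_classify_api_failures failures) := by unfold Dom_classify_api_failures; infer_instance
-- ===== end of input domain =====

-- B replaces A's five separate short-circuit scans by one pass that accumulates five flags,
-- then decides by a flat precedence ladder (objective: simpler).

-- ===== PORT A =====
def classify_api_failures (failures : List String) : String :=
  if failures = [] then "unknown"
  else if failures.all (fun f => PySem.Str.isIn "HTTP404" f) then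
    "missing-required-params-or-invalid-endpoint"
  else if failures.any (fun f => PySem.Str.isIn "HTTP401" f || PySem.Str.isIn "HTTP403" f) then
    "auth-or-permission"
  else if failures.any (fun f => PySem.Str.isIn "HTTP500" f || PySem.Str.isIn "HTTP502" f || PySem.Str.isIn "HTTP503" f) then
    "upstream-server-error"
  else if failures.any (fun f => PySem.Str.isIn "invalid-response" f) then
    "invalid-response-format"
  else if failures.any (fun f => PySem.Str.isIn "URLError" f || PySem.Str.isIn "TimeoutError" f) then
    "network-error"
  else "unknown"

-- ===== PORT B =====
-- one for-loop accumulating the five flags (all_404, any_auth, any_upstream, any_invalid, any_network)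
def classify_api_failures_altStep (acc : Bool × Bool × Bool × Bool × Bool) (f : String) :
    Bool × Bool × Bool × Bool × Bool :=
  ( (if !(PySem.Str.isIn "HTTP404" f) then false else acc.1),
    (if PySem.Str.isIn "HTTP401" f || PySem.Str.isIn "HTTP403" f then true else acc.2.1),
    (if PySem.Str.isIn "HTTP500" f || PySem.Str.isIn "HTTP502" f || PySem.Str.isIn "HTTP503" f then true else acc.2.2.1),
    (if PySem.Str.isIn "invalid-response" f then true else acc.2.2.2.1),
    (if PySem.Str.isIn "URLError" f || PySem.Str.isIn "TimeoutError" f then true else acc.2.2.2.2) )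

def classify_api_failures_alt (failures : List String) : String :=
  if failures = [] then "unknown"
  else
    let flags := failures.foldl classify_api_failures_altStep (true, false, false, false, false)
    if flags.1 then "missing-required-params-or-invalid-endpoint"
    else if flags.2.1 then "auth-or-permission"
    else if flags.2.2.1 then "upstream-server-error"
    else if flags.2.2.2.1 then "invalid-response-format"
    else if flags.2.2.2.2 then "network-error"
    else "unknown"

-- ===== PRECONDITION & SPEC =====
def Spec_classify_api_failures (failures : List String) (out : String) : Prop := out = classify_api_failures_alt failures
instance (failures : List String) (out : String) : Decidable (Spec_classify_api_failures failures out) := by unfold Spec_classify_api_failures; infer_instance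

-- ===== CLAIM (what is proved, stated in full; the proofs are below) =====
def Claim_equal_classify_api_failures : Prop := ∀ (failures : List String), Dom_classify_api_failures failures → Spec_classify_api_failures failures (classify_api_failures failures)

-- ===== LEMMAS AND PROOFS =====
-- The fold computes exactly (init.1 && all c1, init.2.1 || any c2, …)
theorem classify_api_failures_fold_char (l : List String) (init : Bool × Bool × Bool × Bool × Bool) :
    l.foldl classify_api_failures_altStep init =
      ( init.1 && l.all (fun f => PySem.Str.isIn "HTTP404" f),
        init.2.1 || l.any (fun f => PySem.Str.isIn "HTTP401" f || PySem.Str.isIn "HTTP403" f),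
        init.2.2.1 || l.any (fun f => PySem.Str.isIn "HTTP500" f || PySem.Str.isIn "HTTP502" f || PySem.Str.isIn "HTTP503" f),
        init.2.2.2.1 || l.any (fun f => PySem.Str.isIn "invalid-response" f),
        init.2.2.2.2 || l.any (fun f => PySem.Str.isIn "URLError" f || PySem.Str.isIn "TimeoutError" f) ) := by
  induction l generalizing init with
  | nil => simp
  | cons f t ih =>
    simp only [List.foldl_cons, ih, List.all_cons, List.any_cons, classify_api_failures_altStep]
    obtain ⟨a, b, c, d, e⟩ := init
    dsimp only
    split_ifs <;> simp_all

-- ===== VERDICT (by name: the statement is the Claim_ definition above) =====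
theorem classify_api_failures_spec : Claim_equal_classify_api_failures := by
  intro failures _
  unfold Spec_classify_api_failures classify_api_failures classify_api_failures_alt
  simp only [classify_api_failures_fold_char, Bool.true_and, Bool.false_or]
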